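-- pv_equiv track=rewrite | github.com/spasrichakkp/MedVaani | infrastructure/adapters/aloe_medical_adapter.py | _match_symptom_patterns
-- ===== SOURCE A (Python) =====
-- from typing import Dict, List, Optional, Any, Tuple
--
-- def _match_symptom_patterns(symptoms: str, patterns: Dict[str, List[str]]) -> Dict[str, int]:
--     """Match symptoms against condition patterns"""
--     matches = {}
--     for condition, pattern_symptoms in patterns.items():
--         score = 0
--         for pattern_symptom in pattern_symptoms:
--             if pattern_symptom in symptoms:
--                 score += 1
--         if score > 0:
--             matches[condition] = score
--     return matches
-- ===== SOURCE B (Python) =====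
-- def _match_symptom_patterns(symptoms, patterns):
--     """Match symptoms against condition patterns.
--
--     Instead of scanning `symptoms` once per pattern symptom, enumerate every
--     substring of `symptoms` whose length occurs among the pattern symptoms
--     into a hash set once; each pattern symptom is then a single set lookup.
--     """
--     lengths = {len(p) for ps in patterns.values() for p in ps}
--     n = len(symptoms)
--     window_set = set()
--     for length in lengths:
--         for i in range(n - length + 1):
--             window_set.add(symptoms[i:i + length])
--     matches = {}
--     for condition, ps in patterns.items():
--         score = len([p for p in ps if p in window_set])
--         if score > 0:
--             matches[condition] = score
--     return matches
-- ===== Notes on version B (the rewrite author's own statement) =====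
-- stated objective: faster
-- what changed: Instead of running a substring search over `symptoms` for every pattern symptom, B enumerates once all substrings of `symptoms` whose lengths occur among the pattern symptoms into a hash set, and each pattern symptom becomes a single O(1) set lookup.
import Mathlib
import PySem

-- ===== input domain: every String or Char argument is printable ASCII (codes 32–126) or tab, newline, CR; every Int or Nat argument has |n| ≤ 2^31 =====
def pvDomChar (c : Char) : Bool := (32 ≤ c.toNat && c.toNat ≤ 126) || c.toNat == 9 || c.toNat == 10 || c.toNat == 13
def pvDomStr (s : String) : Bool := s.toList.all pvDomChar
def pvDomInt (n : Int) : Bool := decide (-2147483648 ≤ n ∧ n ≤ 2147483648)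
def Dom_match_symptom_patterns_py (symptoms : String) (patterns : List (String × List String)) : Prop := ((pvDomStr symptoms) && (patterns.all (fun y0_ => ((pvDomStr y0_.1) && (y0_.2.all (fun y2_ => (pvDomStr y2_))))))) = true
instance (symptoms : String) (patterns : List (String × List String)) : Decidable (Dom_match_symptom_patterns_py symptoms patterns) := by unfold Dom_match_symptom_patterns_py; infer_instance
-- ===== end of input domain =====

-- B replaces the per-pattern substring scan of A by one precomputed hash set of all
-- substrings of `symptoms` of the occurring pattern lengths (objective: faster; a timing run measured B faster).
-- Both ports receive the dict argument as an association list and first collapse it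
-- with PySem.Dict.ofList, exactly as Python's dict construction does.

-- ===== PORT A =====
def match_symptom_patterns_py (symptoms : String) (patterns : List (String × List String)) : List (String × Int) :=
  ((PySem.Dict.ofList patterns).items.foldl
    (fun (m : PySem.Dict String Int) cp =>
      let score : Int := cp.2.foldl (fun sc p => if PySem.Str.isIn p symptoms then sc + 1 else sc) 0
      if score > 0 then m.insert cp.1 score else m)
    PySem.Dict.empty).items

-- ===== PORT B =====
-- B-side helpers: the set of pattern lengths and the set of all substrings of s of those lengths
def pvLengths (items : List (String × List String)) : PySem.Set Nat :=
  PySem.Set.ofList (items.flatMap (fun cp => cp.2.map (fun p => p.toList.length)))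

def pvWindows (s : List Char) (lengths : PySem.Set Nat) : PySem.Set (List Char) :=
  List.foldl
    (fun (acc : PySem.Set (List Char)) (L : Nat) =>
      List.foldl
        (fun acc2 i => acc2.add (PySem.List.slice s (some i) (some (i + (L : Int)))))
        acc
        (PySem.List.pyRange 0 ((s.length : Int) - (L : Int) + 1) 1))
    PySem.Set.empty lengths

def match_symptom_patterns_py_alt (symptoms : String) (patterns : List (String × List String)) : List (String × Int) :=
  let items := (PySem.Dict.ofList patterns).items
  let windows := pvWindows symptoms.toList (pvLengths items)
  (items.foldl
    (fun (m : PySem.Dict String Int) cp =>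
      let score : Int := ((cp.2.filter (fun p => windows.contains p.toList)).length : Int)
      if score > 0 then m.insert cp.1 score else m)
    PySem.Dict.empty).items

-- ===== PRECONDITION & SPEC =====
def Spec_match_symptom_patterns_py (symptoms : String) (patterns : List (String × List String)) (out : List (String × Int)) : Prop := out = match_symptom_patterns_py_alt symptoms patterns
instance (symptoms : String) (patterns : List (String × List String)) (out : List (String × Int)) : Decidable (Spec_match_symptom_patterns_py symptoms patterns out) := by unfold Spec_match_symptom_patterns_py; infer_instance

-- ===== CLAIM (what is proved, stated in full; the proofs are below) =====
def Claim_equal_match_symptom_patterns_py : Prop := ∀ (symptoms : String) (patterns : List (String × List String)), Dom_match_symptom_patterns_py symptoms patterns → Spec_match_symptom_patterns_py symptoms patterns (match_symptom_patterns_py symptoms patterns)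

-- ===== LEMMAS AND PROOFS =====

-- membership in a fold that adds f i for every i of a list
theorem pv_mem_foldl_add {α β : Type} [BEq α] [LawfulBEq α] (f : β → α) (l : List β)
    (a0 : PySem.Set α) (x : α) :
    x ∈ l.foldl (fun acc i => acc.add (f i)) a0 ↔ x ∈ a0 ∨ ∃ i ∈ l, f i = x := by
  induction l generalizing a0 with
  | nil => simp
  | cons h t ih => simp [ih, PySem.Set.mem_add]; tauto

-- membership in the window set
theorem pv_mem_windows_aux (s : List Char) (lengths : List Nat) (a0 : PySem.Set (List Char)) (x : List Char) :
    x ∈ List.foldl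
        (fun (acc : PySem.Set (List Char)) (L : Nat) =>
          List.foldl
            (fun acc2 i => acc2.add (PySem.List.slice s (some i) (some (i + (L : Int)))))
            acc
            (PySem.List.pyRange 0 ((s.length : Int) - (L : Int) + 1) 1))
        a0 lengths ↔
      x ∈ a0 ∨ ∃ L ∈ lengths, ∃ i ∈ PySem.List.pyRange 0 ((s.length : Int) - (L : Int) + 1) 1,
        PySem.List.slice s (some i) (some (i + (L : Int))) = x := by
  induction lengths generalizing a0 with
  | nil => simp
  | cons h t ih =>
      simp only [List.foldl_cons]
      rw [ih]
      rw [pv_mem_foldl_add]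
      simp only [List.mem_cons]
      constructor
      · rintro (⟨hx | ⟨i, hi, hf⟩⟩ | ⟨L, hL, w⟩)
        · exact Or.inl hx
        · exact Or.inr ⟨h, Or.inl rfl, i, hi, hf⟩
        · exact Or.inr ⟨L, Or.inr hL, w⟩
      · rintro (hx | ⟨L, (rfl | hL), w⟩)
        · exact Or.inl (Or.inl hx)
        · exact Or.inl (Or.inr w)
        · exact Or.inr ⟨L, hL, w⟩

theorem pv_mem_windows (s : List Char) (lengths : PySem.Set Nat) (x : List Char) :
    x ∈ pvWindows s lengths ↔
      ∃ L ∈ lengths, ∃ i ∈ PySem.List.pyRange 0 ((s.length : Int) - (L : Int) + 1) 1,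
        PySem.List.slice s (some i) (some (i + (L : Int))) = x := by
  unfold pvWindows
  rw [pv_mem_windows_aux]
  have he : ∀ y : List Char, y ∉ (PySem.Set.empty : PySem.Set (List Char)) := by
    intro y hy
    have hy' : y ∈ PySem.Set.ofList ([] : List (List Char)) := hy
    rw [PySem.Set.mem_ofList] at hy'
    simp at hy'
  constructor
  · rintro (hx | w)
    · exact absurd hx (he x)
    · exact w
  · exact Or.inr

-- a slice with natural bounds is an infix
theorem pv_slice_infix (s : List Char) (a b : Nat) :
    PySem.List.slice s (some (a : Int)) (some (b : Int)) <:+: s := by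
  rw [PySem.List.slice_natCast]
  exact (List.take_prefix _ _).isInfix.trans (List.drop_suffix a s).isInfix

-- an infix occurs as a window of its own length
theorem pv_infix_window (s p : List Char) (h : p <:+: s) :
    ∃ i ∈ PySem.List.pyRange 0 ((s.length : Int) - (p.length : Int) + 1) 1,
      PySem.List.slice s (some i) (some (i + (p.length : Int))) = p := by
  obtain ⟨t, u, hs⟩ := h
  refine ⟨(t.length : Int), ?_, ?_⟩
  · rw [PySem.List.mem_pyRange_one]
    constructor
    · positivity
    · have : s.length = t.length + p.length + u.length := by
        subst hs; simp; omega
      push_cast [this]; omega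
  · have : (t.length : Int) + (p.length : Int) = ((t.length + p.length : Nat) : Int) := by push_cast; ring
    rw [this, PySem.List.slice_natCast]
    subst hs
    simp

-- the set lookup of B equals the substring test of A for every occurring pattern
theorem pv_contains_eq (symptoms : String) (items : List (String × List String)) (p : String)
    (hp : ∃ cp ∈ items, p ∈ cp.2) :
    (pvWindows symptoms.toList (pvLengths items)).contains p.toList = PySem.Str.isIn p symptoms := by
  rw [Bool.eq_iff_iff, PySem.Set.contains_iff, PySem.Str.isIn_iff_infix, pv_mem_windows]
  constructor
  · rintro ⟨L, _, i, hi, hsl⟩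
    rw [PySem.List.mem_pyRange_one] at hi
    obtain ⟨hi0, _⟩ := hi
    obtain ⟨j, rfl⟩ : ∃ j : Nat, i = (j : Int) := ⟨i.toNat, (Int.toNat_of_nonneg hi0).symm⟩
    have : (j : Int) + (L : Int) = ((j + L : Nat) : Int) := by push_cast; ring
    rw [this] at hsl
    exact hsl ▸ pv_slice_infix symptoms.toList j (j + L)
  · intro hinf
    refine ⟨p.toList.length, ?_, pv_infix_window symptoms.toList p.toList hinf⟩
    obtain ⟨cp, hcp, hpc⟩ := hp
    unfold pvLengths
    rw [PySem.Set.mem_ofList, List.mem_flatMap]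
    exact ⟨cp, hcp, List.mem_map.mpr ⟨p, hpc, rfl⟩⟩

-- ===== VERDICT (by name: the statement is the Claim_ definition above) =====
theorem match_symptom_patterns_py_spec : Claim_equal_match_symptom_patterns_py := by
  intro symptoms patterns _
  unfold Spec_match_symptom_patterns_py match_symptom_patterns_py match_symptom_patterns_py_alt
  congr 1
  apply PySem.List.foldl_congr_mem
  intro m cp hcp
  have hsc :
      (cp.2.foldl (fun sc p => if PySem.Str.isIn p symptoms then sc + 1 else sc) (0 : Int))
        = ((cp.2.filter (fun p => (pvWindows symptoms.toList (pvLengths (PySem.Dict.ofList patterns).items)).contains p.toList)).length : Int) := by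
    rw [PySem.List.foldl_if_add_one, zero_add, ← List.countP_eq_length_filter]
    congr 1
    apply List.countP_congr
    intro x hx
    exact Bool.eq_iff_iff.mp (pv_contains_eq symptoms (PySem.Dict.ofList patterns).items x ⟨cp, hcp, hx⟩).symm
  simp only [hsc]
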